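-- pv_equiv track=rewrite | github.com/alaawaku5/NYU_Data_Structures | hw 4/km5188_hw4_q5.py | is_number_of_lowercase_even
-- ===== SOURCE A (Python) =====
-- def is_number_of_lowercase_even(s, low, high):
--     if low > high:
--         return True
--     else:
--         if s[low].islower():
--             return not is_number_of_lowercase_even(s, low + 1, high)
--         else:
--             return is_number_of_lowercase_even(s, low + 1, high)
-- ===== SOURCE B (Python) =====
-- def is_number_of_lowercase_even(s, low, high):
--     count = 0
--     for i in range(low, high + 1):
--         if s[i].islower():
--             count += 1
--     return count % 2 == 0
-- ===== Notes on version B (the rewrite author's own statement) =====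
-- stated objective: simpler
-- what changed: Replaces the boolean-flipping recursion with a single iterative counting loop over range(low, high+1) followed by a parity check.
import Mathlib
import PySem

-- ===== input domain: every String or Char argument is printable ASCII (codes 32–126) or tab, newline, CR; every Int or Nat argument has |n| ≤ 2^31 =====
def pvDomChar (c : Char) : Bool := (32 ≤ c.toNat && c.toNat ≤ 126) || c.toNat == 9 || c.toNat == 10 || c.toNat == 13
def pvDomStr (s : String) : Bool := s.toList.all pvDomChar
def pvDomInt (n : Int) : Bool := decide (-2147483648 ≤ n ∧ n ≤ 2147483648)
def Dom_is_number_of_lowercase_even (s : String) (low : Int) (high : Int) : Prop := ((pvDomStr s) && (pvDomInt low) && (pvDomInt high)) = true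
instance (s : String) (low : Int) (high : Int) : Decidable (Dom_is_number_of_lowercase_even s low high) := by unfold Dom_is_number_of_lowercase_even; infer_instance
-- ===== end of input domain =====

-- B replaces A's boolean-flipping recursion by an iterative counting loop plus a parity check (simpler, constant space).


-- ===== PORT A =====
def is_number_of_lowercase_even (s : String) (low : Int) (high : Int) : Bool :=
  if low > high then true
  else
    -- s[low] (IndexError = none, excluded by Pre_)
    if PySem.Chars.islower ((PySem.Str.pyGet? s low).getD ' ') then
      !(is_number_of_lowercase_even s (low + 1) high)
    else
      is_number_of_lowercase_even s (low + 1) high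
termination_by (high + 1 - low).toNat
decreasing_by all_goals omega

-- ===== PORT B =====
def is_number_of_lowercase_even_alt (s : String) (low : Int) (high : Int) : Bool :=
  let count : Int :=
    (PySem.List.pyRange low (high + 1) 1).foldl
      (fun acc i => if PySem.Chars.islower ((PySem.Str.pyGet? s i).getD ' ') then acc + 1 else acc) 0
  PySem.Int.mod count 2 == 0

-- ===== PRECONDITION & SPEC =====
-- Exactly the inputs where A returns: empty range, or every index low..high is in Python range.
def Pre_is_number_of_lowercase_even (s : String) (low : Int) (high : Int) : Prop :=
  low > high ∨ (-(s.toList.length : Int) ≤ low ∧ high < s.toList.length)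
instance (s : String) (low : Int) (high : Int) : Decidable (Pre_is_number_of_lowercase_even s low high) := by
  unfold Pre_is_number_of_lowercase_even; infer_instance
def pvWitness_is_number_of_lowercase_even : String × Int × Int := ("aBc", 0, 2)

def Spec_is_number_of_lowercase_even (s : String) (low : Int) (high : Int) (out : Bool) : Prop := out = is_number_of_lowercase_even_alt s low high
instance (s : String) (low : Int) (high : Int) (out : Bool) : Decidable (Spec_is_number_of_lowercase_even s low high out) := by unfold Spec_is_number_of_lowercase_even; infer_instance

-- ===== CLAIM (what is proved, stated in full; the proofs are below) =====
def Claim_equal_is_number_of_lowercase_even : Prop := ∀ (s : String) (low : Int) (high : Int), Dom_is_number_of_lowercase_even s low high → Pre_is_number_of_lowercase_even s low high → Spec_is_number_of_lowercase_even s low high (is_number_of_lowercase_even s low high)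

-- ===== LEMMAS AND PROOFS =====

-- the per-index test both ports use
def pvLowP (s : String) (i : Int) : Bool := PySem.Chars.islower ((PySem.Str.pyGet? s i).getD ' ')

lemma pyRange_count_parity (c : Nat) (b : Bool) :
    (cond b (!decide (c % 2 = 0)) (decide (c % 2 = 0))) =
      decide ((c + cond b 1 0) % 2 = 0) := by
  by_cases hc : c % 2 = 0 <;> cases b <;> simp [hc] <;> omega

-- B computes the parity of the count of lowercase indices in [low, high]
lemma alt_eq_parity (s : String) (low high : Int) :
    is_number_of_lowercase_even_alt s low high =
      decide ((PySem.List.pyRange low (high + 1) 1).countP (pvLowP s) % 2 = 0) := by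
  unfold is_number_of_lowercase_even_alt
  show (PySem.Int.mod ((PySem.List.pyRange low (high + 1) 1).foldl
      (fun acc i => if pvLowP s i then acc + 1 else acc) 0) 2 == 0) =
    decide ((PySem.List.pyRange low (high + 1) 1).countP (pvLowP s) % 2 = 0)
  rw [PySem.List.foldl_if_add_one (pvLowP s)]
  simp only [PySem.Int.mod, zero_add]
  rw [Int.fmod_eq_emod, if_pos (Or.inl (by norm_num : (0:Int) ≤ 2)), add_zero]
  rcases Nat.even_or_odd ((PySem.List.pyRange low (high + 1) 1).countP (pvLowP s)) with he | ho
  · have h0 : (PySem.List.pyRange low (high + 1) 1).countP (pvLowP s) % 2 = 0 := Nat.even_iff.mp he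
    simp [h0]
    omega
  · have h1 : (PySem.List.pyRange low (high + 1) 1).countP (pvLowP s) % 2 = 1 := Nat.odd_iff.mp ho
    simp [h1]
    omega

-- A computes the same parity, by induction on the length of the range
lemma a_eq_parity (s : String) (low high : Int) :
    is_number_of_lowercase_even s low high =
      decide ((PySem.List.pyRange low (high + 1) 1).countP (pvLowP s) % 2 = 0) := by
  by_cases h : low > high
  · rw [is_number_of_lowercase_even]
    simp [h, PySem.List.pyRange_one_eq_nil (by omega : high + 1 ≤ low)]
  · rw [is_number_of_lowercase_even]
    rw [PySem.List.pyRange_one_cons (by omega : low < high + 1)]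
    rw [a_eq_parity s (low + 1) high]
    simp only [List.countP_cons, if_neg h]
    have hb : ∀ b : Bool, (if b then !decide ((PySem.List.pyRange (low + 1) (high + 1) 1).countP (pvLowP s) % 2 = 0)
        else decide ((PySem.List.pyRange (low + 1) (high + 1) 1).countP (pvLowP s) % 2 = 0)) =
        decide (((PySem.List.pyRange (low + 1) (high + 1) 1).countP (pvLowP s) + cond b 1 0) % 2 = 0) := by
      intro b
      rw [← pyRange_count_parity]
      cases b <;> rfl
    rw [show (PySem.Chars.islower ((PySem.Str.pyGet? s low).getD ' ')) = pvLowP s low from rfl] at *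
    rw [hb (pvLowP s low)]
    congr 1
    cases pvLowP s low <;> rfl
termination_by (high + 1 - low).toNat
decreasing_by all_goals omega

-- ===== VERDICT (by name: the statement is the Claim_ definition above) =====
theorem is_number_of_lowercase_even_spec : Claim_equal_is_number_of_lowercase_even := by
  intro s low high _ _
  unfold Spec_is_number_of_lowercase_even
  rw [a_eq_parity, alt_eq_parity]
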